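-- pv_equiv track=rewrite | github.com/ZeR0HeR00/CA_Formation | Eau/eau06.py | uppercase_over_two
-- ===== SOURCE A (Python) =====
-- def uppercase_over_two(text):
--
--     text = text.lower()
--     result = ""
--     index_letter = 0
--
--     for i in range(len(text)):
--
--         if index_letter % 2 == 0:
--             result += text[i].upper()
--         else:
--             result += text[i]
--
--         if text[i] != " ":
--             index_letter += 1
--
--     return result
-- ===== SOURCE B (Python) =====
-- def uppercase_over_two(text):
--     low = text.lower()
--     nonspace = [c for c in low if c != ' ']
--     transformed = [c.upper() if i % 2 == 0 else c for i, c in enumerate(nonspace)]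
--     out = []
--     j = 0
--     for c in low:
--         if c == ' ':
--             out.append(' ')
--         else:
--             out.append(transformed[j])
--             j += 1
--     return ''.join(out)
-- ===== Notes on version B (the rewrite author's own statement) =====
-- stated objective: alternative
-- what changed: replaces A's single counter-driven pass (string += with a running non-space counter) by an extract/transform/merge pipeline: collect non-space characters, uppercase those at even positions via enumerate, then merge them back over the spaces
import Mathlib
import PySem

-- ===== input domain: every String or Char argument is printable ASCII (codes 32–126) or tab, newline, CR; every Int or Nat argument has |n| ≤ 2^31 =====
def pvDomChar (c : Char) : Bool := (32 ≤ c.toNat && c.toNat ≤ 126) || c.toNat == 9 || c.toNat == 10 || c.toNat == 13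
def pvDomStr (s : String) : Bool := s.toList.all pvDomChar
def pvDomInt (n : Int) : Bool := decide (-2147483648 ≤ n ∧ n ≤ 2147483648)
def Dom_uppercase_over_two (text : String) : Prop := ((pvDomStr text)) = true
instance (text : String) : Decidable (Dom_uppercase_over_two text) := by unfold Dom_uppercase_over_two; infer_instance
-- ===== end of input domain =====

-- B replaces A's single counter-driven pass with an extract→transform→merge pipeline (alternative decomposition, same result).


-- ===== PORT A =====
-- literal port: lower the text, then one pass appending each char (uppercased when the
-- running non-space counter is even), incrementing the counter on every non-space char
def uppercase_over_two (text : String) : String :=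
  let low := (PySem.Str.lower text).toList
  let st := low.foldl
    (fun (st : List Char × Int) c =>
      (st.1 ++ [if PySem.Int.mod st.2 2 = 0 then PySem.Chars.upperChar c else c],
       if c ≠ ' ' then st.2 + 1 else st.2))
    ([], 0)
  String.ofList st.1

-- ===== PORT B =====
-- merge loop of Source B: spaces pass through, non-spaces pull the next transformed char
def pvMerge (low ts : List Char) : List Char :=
  match low, ts with
  | [], _ => []
  | c :: rest, ts =>
      if c = ' ' then ' ' :: pvMerge rest ts
      else match ts with
        | t :: ts' => t :: pvMerge rest ts'
        | [] => pvMerge rest []     -- unreachable: ts has one element per non-space of low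

def uppercase_over_two_alt (text : String) : String :=
  let low := (PySem.Str.lower text).toList
  let nonspace := low.filter (fun c => c != ' ')
  let transformed := (PySem.List.enumerate nonspace 0).map
    (fun p => if PySem.Int.mod p.1 2 = 0 then PySem.Chars.upperChar p.2 else p.2)
  String.ofList (pvMerge low transformed)

-- ===== PRECONDITION & SPEC =====
def Spec_uppercase_over_two (text : String) (out : String) : Prop := out = uppercase_over_two_alt text
instance (text : String) (out : String) : Decidable (Spec_uppercase_over_two text out) := by unfold Spec_uppercase_over_two; infer_instance

-- ===== CLAIM (what is proved, stated in full; the proofs are below) =====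
def Claim_equal_uppercase_over_two : Prop := ∀ (text : String), Dom_uppercase_over_two text → Spec_uppercase_over_two text (uppercase_over_two text)

-- ===== LEMMAS AND PROOFS =====

-- A's loop as a structural recursion (proof device)
def pvAGo (cs : List Char) (k : Int) : List Char :=
  match cs with
  | [] => []
  | c :: rest =>
      (if PySem.Int.mod k 2 = 0 then PySem.Chars.upperChar c else c) ::
        pvAGo rest (if c ≠ ' ' then k + 1 else k)

lemma pvA_foldl (cs : List Char) (acc : List Char) (k : Int) :
    (cs.foldl
      (fun (st : List Char × Int) c =>
        (st.1 ++ [if PySem.Int.mod st.2 2 = 0 then PySem.Chars.upperChar c else c],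
         if c ≠ ' ' then st.2 + 1 else st.2))
      (acc, k)).1 = acc ++ pvAGo cs k := by
  induction cs generalizing acc k with
  | nil => simp [pvAGo]
  | cons c rest ih =>
    rw [List.foldl_cons, ih, pvAGo]
    simp

-- B's transformed list as the same structural recursion
def pvTGo (cs : List Char) (k : Int) : List Char :=
  match cs with
  | [] => []
  | c :: rest =>
      (if PySem.Int.mod k 2 = 0 then PySem.Chars.upperChar c else c) :: pvTGo rest (k + 1)

lemma pvT_enum (cs : List Char) (k : Int) :
    (PySem.List.enumerate cs k).map
      (fun p => if PySem.Int.mod p.1 2 = 0 then PySem.Chars.upperChar p.2 else p.2)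
      = pvTGo cs k := by
  induction cs generalizing k with
  | nil => simp [pvTGo, PySem.List.enumerate_nil]
  | cons c rest ih =>
    rw [PySem.List.enumerate_cons, List.map_cons, ih, pvTGo]

lemma pvMerge_eq_aGo (cs : List Char) (k : Int) :
    pvMerge cs (pvTGo (cs.filter (fun c => c != ' ')) k) = pvAGo cs k := by
  induction cs generalizing k with
  | nil => simp [pvMerge, pvAGo]
  | cons c rest ih =>
    by_cases hc : c = ' '
    · subst hc
      have hf : (' ' :: rest).filter (fun c => c != ' ') = rest.filter (fun c => c != ' ') := by
        simp
      have hm : pvMerge (' ' :: rest) (pvTGo (rest.filter (fun c => c != ' ')) k)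
          = ' ' :: pvMerge rest (pvTGo (rest.filter (fun c => c != ' ')) k) := by
        simp [pvMerge]
      rw [hf, hm, pvAGo,
        show PySem.Chars.upperChar ' ' = ' ' from rfl, ite_self,
        show (if (' ' : Char) ≠ ' ' then k + 1 else k) = k from if_neg (by simp), ih]
    · have hf : (c :: rest).filter (fun c => c != ' ') = c :: rest.filter (fun c => c != ' ') := by
        simp [hc]
      have hm : ∀ t ts, pvMerge (c :: rest) (t :: ts) = t :: pvMerge rest ts := by
        intro t ts; simp [pvMerge, hc]
      rw [hf, pvTGo, hm, pvAGo,
        show (if c ≠ ' ' then k + 1 else k) = k + 1 from if_pos hc, ih]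

-- ===== VERDICT (by name: the statement is the Claim_ definition above) =====
theorem uppercase_over_two_spec : Claim_equal_uppercase_over_two := by
  intro text _
  unfold Spec_uppercase_over_two uppercase_over_two uppercase_over_two_alt
  simp only [pvA_foldl, pvT_enum, List.nil_append]
  rw [pvMerge_eq_aGo]
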